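-- pv_equiv track=rewrite | github.com/nicksowl/BLASTtv-CS-Match-Log-Analyser | src/blastlog/parse_round_events.py | group_non_empty_rounds
-- ===== SOURCE A (Python) =====
-- from typing import Optional, Dict, List
--
-- def normalise_line_for_json(line: str) -> str:
--     # Avoid \" in JSON by replacing quotes inside log lines
--     return line.replace('"', "'")
--
-- def group_non_empty_rounds(lines: List[str]) -> Dict[str, List[str]]:
--     rounds: Dict[str, List[str]] = {}
--
--     in_round = False
--     round_num = 0
--     current_key: Optional[str] = None
--     current_events: List[str] = []
--
--     for line in lines:
--         if 'World triggered "Round_Start"' in line: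
--             in_round = True
--             round_num += 1
--             current_key = None
--             current_events = []
--             continue
--
--         if in_round and 'World triggered "Round_End"' in line:
--             if current_events:
--                 if current_key is None:
--                     current_key = f"round_{round_num}"
--                 rounds[current_key] = current_events
--             in_round = False
--             current_key = None
--             current_events = []
--             continue
--
--         if in_round:
--             if current_key is None:
--                 current_key = f"round_{round_num}"
--             current_events.append(normalise_line_for_json(line))
--
--     return rounds
-- ===== SOURCE B (Python) =====
-- from typing import Optional, Dict, List
--
-- START = 'World triggered "Round_Start"'
-- END = 'World triggered "Round_End"'
--
-- def normalise_line_for_json(line: str) -> str: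
--     return line.replace('"', "'")
--
-- def _split_segments(lines: List[str]) -> List[List[str]]:
--     # One segment per Round_Start line (header excluded); pre-start lines dropped.
--     segs: List[List[str]] = []
--     cur: Optional[List[str]] = None
--     for line in lines:
--         if START in line:
--             if cur is not None:
--                 segs.append(cur)
--             cur = []
--         elif cur is not None:
--             cur.append(line)
--     if cur is not None:
--         segs.append(cur)
--     return segs
--
-- def _round_events(seg: List[str]) -> Optional[List[str]]:
--     # Normalised lines before the first Round_End; None if the round is never closed.
--     events: List[str] = []
--     for line in seg:
--         if END in line:
--             return events
--         events.append(normalise_line_for_json(line))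
--     return None
--
-- def group_non_empty_rounds(lines: List[str]) -> Dict[str, List[str]]:
--     rounds: Dict[str, List[str]] = {}
--     for num, seg in enumerate(_split_segments(lines), 1):
--         events = _round_events(seg)
--         if events:
--             rounds[f"round_{num}"] = events
--     return rounds
-- ===== Notes on version B (the rewrite author's own statement) =====
-- stated objective: alternative
-- what changed: Replaces A's single stateful scan (in_round flag, pending key/events, conditional store) by a two-phase pipeline: first split the lines into per-Round_Start segments, then map each numbered segment to its events before the first Round_End, keeping only closed non-empty rounds.
import Mathlib
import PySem

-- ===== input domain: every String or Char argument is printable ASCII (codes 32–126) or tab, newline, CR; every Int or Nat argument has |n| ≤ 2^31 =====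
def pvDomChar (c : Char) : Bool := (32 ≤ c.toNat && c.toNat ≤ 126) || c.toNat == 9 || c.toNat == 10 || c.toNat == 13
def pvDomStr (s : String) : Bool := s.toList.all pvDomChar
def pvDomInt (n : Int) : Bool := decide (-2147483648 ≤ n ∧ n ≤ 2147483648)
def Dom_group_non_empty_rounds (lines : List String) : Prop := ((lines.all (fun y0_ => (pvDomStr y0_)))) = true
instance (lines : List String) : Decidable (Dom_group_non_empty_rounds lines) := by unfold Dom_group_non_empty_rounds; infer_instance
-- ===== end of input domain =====

-- B replaces A's single stateful scan by a split-into-segments-then-process pipeline (objective: alternative decomposition, same cost).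

-- ===== PORT A =====
def normalise_line_for_json (line : String) : String :=
  PySem.Str.replace line "\"" "'"

def groupLoop (lines : List String) (rounds : PySem.Dict String (List String))
    (in_round : Bool) (round_num : Int) (current_key : Option String)
    (current_events : List String) : PySem.Dict String (List String) :=
  match lines with
  | [] => rounds
  | line :: rest =>
    if PySem.Str.isIn "World triggered \"Round_Start\"" line then
      groupLoop rest rounds true (round_num + 1) none []
    else if in_round && PySem.Str.isIn "World triggered \"Round_End\"" line then
      let rounds' :=
        if current_events ≠ [] then
          let key := match current_key with
            | none => "round_" ++ PySem.Int.toStr round_num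
            | some k => k
          rounds.insert key current_events
        else rounds
      groupLoop rest rounds' false round_num none []
    else if in_round then
      let key := match current_key with
        | none => some ("round_" ++ PySem.Int.toStr round_num)
        | some k => some k
      groupLoop rest rounds in_round round_num key (current_events ++ [normalise_line_for_json line])
    else
      groupLoop rest rounds in_round round_num current_key current_events

def group_non_empty_rounds (lines : List String) : List (String × List String) :=
  (groupLoop lines PySem.Dict.empty false 0 none []).items

-- ===== PORT B =====
def splitLoop (lines : List String) (segs : List (List String)) (cur : Option (List String)) :
    List (List String) × Option (List String) :=
  match lines with
  | [] => (segs, cur)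
  | line :: rest =>
    if PySem.Str.isIn "World triggered \"Round_Start\"" line then
      match cur with
      | some c => splitLoop rest (segs ++ [c]) (some [])
      | none => splitLoop rest segs (some [])
    else
      match cur with
      | some c => splitLoop rest segs (some (c ++ [line]))
      | none => splitLoop rest segs none

def splitSegments (lines : List String) : List (List String) :=
  match splitLoop lines [] none with
  | (segs, some c) => segs ++ [c]
  | (segs, none) => segs

def roundEvents (seg : List String) (events : List String) : Option (List String) :=
  match seg with
  | [] => none
  | line :: rest =>
    if PySem.Str.isIn "World triggered \"Round_End\"" line then some events
    else roundEvents rest (events ++ [normalise_line_for_json line])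

def group_non_empty_rounds_alt (lines : List String) : List (String × List String) :=
  ((PySem.List.enumerate (splitSegments lines) 1).foldl
    (fun rounds p =>
      match roundEvents p.2 [] with
      | some ev => if ev ≠ [] then rounds.insert ("round_" ++ PySem.Int.toStr p.1) ev else rounds
      | none => rounds)
    PySem.Dict.empty).items

-- ===== PRECONDITION & SPEC =====
def Spec_group_non_empty_rounds (lines : List String) (out : List (String × List String)) : Prop := out = group_non_empty_rounds_alt lines
instance (lines : List String) (out : List (String × List String)) : Decidable (Spec_group_non_empty_rounds lines out) := by unfold Spec_group_non_empty_rounds; infer_instance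

-- ===== CLAIM (what is proved, stated in full; the proofs are below) =====
def Claim_equal_group_non_empty_rounds : Prop := ∀ (lines : List String), Dom_group_non_empty_rounds lines → Spec_group_non_empty_rounds lines (group_non_empty_rounds lines)

-- ===== LEMMAS AND PROOFS =====

-- B's second phase, written with explicit numbering so it can be peeled one segment at a time.
def procSegs (segs : List (List String)) (n : Int) (d : PySem.Dict String (List String)) :
    PySem.Dict String (List String) :=
  (PySem.List.enumerate segs n).foldl
    (fun rounds p =>
      match roundEvents p.2 [] with
      | some ev => if ev ≠ [] then rounds.insert ("round_" ++ PySem.Int.toStr p.1) ev else rounds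
      | none => rounds)
    d

def flushSegs (p : List (List String) × Option (List String)) : List (List String) :=
  match p with
  | (segs, some c) => segs ++ [c]
  | (segs, none) => segs

theorem splitSegments_eq (lines : List String) :
    splitSegments lines = flushSegs (splitLoop lines [] none) := by
  unfold splitSegments flushSegs
  cases h : splitLoop lines [] none with
  | mk a b => cases b <;> rfl

theorem procSegs_cons (c : List String) (segs : List (List String)) (n : Int)
    (d : PySem.Dict String (List String)) :
    procSegs (c :: segs) n d =
      procSegs segs (n + 1)
        (match roundEvents c [] with
         | some ev => if ev ≠ [] then d.insert ("round_" ++ PySem.Int.toStr n) ev else d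
         | none => d) := by
  simp [procSegs, PySem.List.enumerate_cons]

-- One-step unfolding equations for the three loops (definitional).
theorem splitLoop_cons_none (l : String) (ls : List String) (segs : List (List String)) :
    splitLoop (l :: ls) segs none =
      if PySem.Str.isIn "World triggered \"Round_Start\"" l then splitLoop ls segs (some [])
      else splitLoop ls segs none := rfl

theorem splitLoop_cons_some (l : String) (ls : List String) (segs : List (List String))
    (c : List String) :
    splitLoop (l :: ls) segs (some c) =
      if PySem.Str.isIn "World triggered \"Round_Start\"" l then splitLoop ls (segs ++ [c]) (some [])
      else splitLoop ls segs (some (c ++ [l])) := rfl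

theorem roundEvents_cons (l : String) (rest : List String) (ev : List String) :
    roundEvents (l :: rest) ev =
      if PySem.Str.isIn "World triggered \"Round_End\"" l then some ev
      else roundEvents rest (ev ++ [normalise_line_for_json l]) := rfl

theorem groupLoop_cons (l : String) (rest : List String) (d : PySem.Dict String (List String))
    (ir : Bool) (n : Int) (ck : Option String) (ev : List String) :
    groupLoop (l :: rest) d ir n ck ev =
      if PySem.Str.isIn "World triggered \"Round_Start\"" l then
        groupLoop rest d true (n + 1) none []
      else if ir && PySem.Str.isIn "World triggered \"Round_End\"" l then
        groupLoop rest
          (if ev ≠ [] then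
            d.insert (match ck with | none => "round_" ++ PySem.Int.toStr n | some k => k) ev
          else d) false n none []
      else if ir then
        groupLoop rest d ir n
          (match ck with | none => some ("round_" ++ PySem.Int.toStr n) | some k => some k)
          (ev ++ [normalise_line_for_json l])
      else groupLoop rest d ir n ck ev := rfl

theorem flushSegs_append (segs X : List (List String)) (o : Option (List String)) :
    flushSegs (segs ++ X, o) = segs ++ flushSegs (X, o) := by
  cases o <;> simp [flushSegs]

theorem splitLoop_append (lines : List String) (segs : List (List String))
    (cur : Option (List String)) :
    splitLoop lines segs cur =
      (segs ++ (splitLoop lines [] cur).1, (splitLoop lines [] cur).2) := by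
  induction lines generalizing segs cur with
  | nil => simp [splitLoop]
  | cons l ls ih =>
    by_cases hs : PySem.Str.isIn "World triggered \"Round_Start\"" l = true
    · cases cur with
      | none =>
        rw [splitLoop_cons_none, splitLoop_cons_none, if_pos hs, if_pos hs]
        exact ih segs (some [])
      | some c =>
        rw [splitLoop_cons_some, splitLoop_cons_some, if_pos hs, if_pos hs]
        rw [ih (segs ++ [c]) (some []), ih ([] ++ [c]) (some [])]
        simp
    · cases cur with
      | none =>
        rw [splitLoop_cons_none, splitLoop_cons_none, if_neg hs, if_neg hs]
        exact ih segs none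
      | some c =>
        rw [splitLoop_cons_some, splitLoop_cons_some, if_neg hs, if_neg hs]
        exact ih segs (some (c ++ [l]))

theorem roundEvents_append_singleton (l : String) (c : List String) (ev : List String) :
    roundEvents (c ++ [l]) ev =
      match roundEvents c ev with
      | some r => some r
      | none =>
        if PySem.Str.isIn "World triggered \"Round_End\"" l then
          some (ev ++ c.map normalise_line_for_json)
        else none := by
  induction c generalizing ev with
  | nil => simp [roundEvents]
  | cons x c' ih =>
    by_cases he : PySem.Str.isIn "World triggered \"Round_End\"" x = true
    · rw [List.cons_append, roundEvents_cons, roundEvents_cons, if_pos he, if_pos he]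
    · rw [List.cons_append, roundEvents_cons, roundEvents_cons, if_neg he, if_neg he]
      rw [ih]
      cases hr : roundEvents c' (ev ++ [normalise_line_for_json x]) with
      | some r => simp
      | none => simp

-- Main fusion lemma: B's two phases, run over the remaining lines from a given split state,
-- compute exactly what A's loop computes from the corresponding loop state.
theorem main_fusion (lines : List String) :
    (∀ (n : Int) (d : PySem.Dict String (List String)),
      procSegs (flushSegs (splitLoop lines [] none)) (n + 1) d =
        groupLoop lines d false n none []) ∧
    (∀ (n : Int) (d : PySem.Dict String (List String)) (c : List String),
      procSegs (flushSegs (splitLoop lines [] (some c))) n d =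
        match roundEvents c [] with
        | none =>
          groupLoop lines d true n
            (if c = [] then none else some ("round_" ++ PySem.Int.toStr n))
            (c.map normalise_line_for_json)
        | some ev₀ =>
          groupLoop lines
            (if ev₀ ≠ [] then d.insert ("round_" ++ PySem.Int.toStr n) ev₀ else d)
            false n none []) := by
  induction lines with
  | nil =>
    constructor
    · intro n d
      show procSegs (flushSegs ([], none)) (n + 1) d = d
      simp [flushSegs, procSegs]
    · intro n d c
      show procSegs (flushSegs ([], some c)) n d = _
      simp only [flushSegs, List.nil_append]
      rw [procSegs_cons]
      cases h : roundEvents c [] with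
      | none => simp [procSegs, PySem.List.enumerate, groupLoop]
      | some ev₀ => simp [procSegs, PySem.List.enumerate, groupLoop]
  | cons l ls ih =>
    obtain ⟨ih1, ih2⟩ := ih
    by_cases hs : PySem.Str.isIn "World triggered \"Round_Start\"" l = true
    · constructor
      · intro n d
        rw [splitLoop_cons_none, if_pos hs, groupLoop_cons, if_pos hs]
        have h2 := ih2 (n + 1) d []
        simpa [roundEvents] using h2
      · intro n d c
        rw [splitLoop_cons_some, if_pos hs]
        rw [splitLoop_append ls ([] ++ [c]) (some [])]
        simp only [List.nil_append]
        rw [flushSegs_append [c] (splitLoop ls [] (some [])).1 (splitLoop ls [] (some [])).2]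
        simp only [Prod.mk.eta, List.singleton_append]
        rw [procSegs_cons]
        have h2 := ih2 (n + 1)
        have hs' := hs
        simp at hs'
        cases h : roundEvents c [] with
        | none =>
          have := h2 d []
          simpa [roundEvents, groupLoop_cons, hs'] using this
        | some ev₀ =>
          have := h2 (if ev₀ ≠ [] then d.insert ("round_" ++ PySem.Int.toStr n) ev₀ else d) []
          simpa [roundEvents, groupLoop_cons, hs'] using this
    · constructor
      · intro n d
        rw [splitLoop_cons_none, if_neg hs, groupLoop_cons, if_neg hs]
        simp only [Bool.false_and, Bool.false_eq_true, if_false]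
        exact ih1 n d
      · intro n d c
        have hs' := hs
        simp at hs'
        rw [splitLoop_cons_some, if_neg hs]
        rw [ih2 n d (c ++ [l])]
        rw [roundEvents_append_singleton l c []]
        cases h : roundEvents c [] with
        | none =>
          by_cases he : PySem.Str.isIn "World triggered \"Round_End\"" l = true
          · have he' := he
            simp at he'
            by_cases hc : c = []
            · subst hc; simp [he', hs', groupLoop_cons]
            · have hmc : c.map normalise_line_for_json ≠ [] := by simp [hc]
              simp [he', hs', hc, hmc, groupLoop_cons]
          · have he' := he
            simp at he'
            by_cases hc : c = []
            · subst hc; simp [he', hs', groupLoop_cons]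
            · simp [he', hs', hc, groupLoop_cons]
        | some ev₀ =>
          simp [groupLoop_cons, hs']

-- ===== VERDICT (by name: the statement is the Claim_ definition above) =====
theorem group_non_empty_rounds_spec : Claim_equal_group_non_empty_rounds := by
  intro lines _
  unfold Spec_group_non_empty_rounds
  have h := (main_fusion lines).1 0 PySem.Dict.empty
  rw [← splitSegments_eq] at h
  norm_num at h
  show (groupLoop lines PySem.Dict.empty false 0 none []).items = group_non_empty_rounds_alt lines
  rw [← h]
  rfl
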